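-- pv_equiv track=rewrite | github.com/MuhammadUllah23/Algorithms-And-Data-Structures | Algorithms/MultiplePointersPattern.py | countUniqueValues
-- ===== SOURCE A (Python) =====
-- def countUniqueValues(sortedArr):
--
--     # edge case
--     if len(sortedArr) == 0:
--         return 0
--
--     if len(sortedArr) == 1:
--         return 1
--
--     i = 0
--     j = 1
--
--     while j < len(sortedArr):
--
--         # check if i and j are equal then move j up 1
--         if sortedArr[i] == sortedArr[j]:
--             j += 1
--         # if i and j are not the same then mve i up 1
--         elif sortedArr[i] != sortedArr[j]:
--             # changing the value to store the count of unique values in sortedArr instead of using new variable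
--             del sortedArr[i+1:j]
--             i += 1
--
--     return len(sortedArr)
-- ===== SOURCE B (Python) =====
-- def countUniqueValues(sortedArr):
--     if not sortedArr:
--         return 0
--     return 1 + sum(1 for a, b in zip(sortedArr, sortedArr[1:]) if a != b)
-- ===== Notes on version B (the rewrite author's own statement) =====
-- stated objective: faster
-- what changed: B counts adjacent-distinct pairs in one pure pass over zipped neighbours instead of A's index loop with in-place slice deletions that shift the list tail.
-- intended difference: On lists that end in two equal elements or contain three equal consecutive elements, A's deletion-and-shift bookkeeping skips or double-counts elements (A returns 2 on [1,1], 3 on [0,0,0,1,2,3] which has 4 distinct values); B returns the number of adjacent-equal groups, the intended count of unique values in a sorted array. — e.g. on countUniqueValues([1, 1]): A returns 2, B returns 1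
import Mathlib
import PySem

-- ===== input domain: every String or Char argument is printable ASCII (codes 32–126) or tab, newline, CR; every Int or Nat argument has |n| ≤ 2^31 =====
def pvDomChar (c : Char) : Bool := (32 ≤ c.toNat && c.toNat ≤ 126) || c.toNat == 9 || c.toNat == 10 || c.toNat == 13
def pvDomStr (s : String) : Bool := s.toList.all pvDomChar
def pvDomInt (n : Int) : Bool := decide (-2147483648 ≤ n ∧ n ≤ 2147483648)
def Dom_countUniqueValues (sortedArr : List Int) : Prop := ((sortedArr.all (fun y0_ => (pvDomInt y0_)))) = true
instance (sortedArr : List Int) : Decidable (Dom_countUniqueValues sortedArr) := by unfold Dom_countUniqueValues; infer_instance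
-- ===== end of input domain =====

-- B counts adjacent-distinct pairs in one pure pass (A mutates its argument in
-- place; the equivalence claimed is about the RETURN value only — B does not mutate).

-- ===== PORT A =====
-- A's while loop, transliterated: state (arr, i, j); i, j start at 0/1 and only
-- grow, list indexing arr[i] is always in range on every reached state so getD's
-- default is never used; `del arr[i+1:j]` is `arr.take (i+1) ++ arr.drop j`
-- (exact: the branch only runs with i+1 ≤ j ≤ len). The fuel argument is only a
-- structural termination guard: each iteration increases i or j, both bounded by
-- the (never-growing) list length, so 2·len+2 fuel is never exhausted.
def pvLoopA : Nat → List Int → Nat → Nat → Int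
  | 0, arr, _, _ => (arr.length : Int)
  | fuel + 1, arr, i, j =>
    if j < arr.length then
      if arr.getD i 0 = arr.getD j 0 then
        pvLoopA fuel arr i (j + 1)
      else
        pvLoopA fuel (arr.take (i + 1) ++ arr.drop j) (i + 1) j
    else
      (arr.length : Int)

def countUniqueValues (sortedArr : List Int) : Int :=
  if sortedArr.length = 0 then 0
  else if sortedArr.length = 1 then 1
  else pvLoopA (2 * sortedArr.length + 2) sortedArr 0 1

-- ===== PORT B =====
-- Source B: `1 + sum(1 for a, b in zip(sortedArr, sortedArr[1:]) if a != b)`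
def countUniqueValues_alt (sortedArr : List Int) : Int :=
  if sortedArr = [] then 0
  else 1 + (((sortedArr.zip (sortedArr.drop 1)).filter (fun p => p.1 ≠ p.2)).length : Int)

-- ===== PRECONDITION & SPEC =====
-- helpers for D_: three equal consecutive elements / the last two elements equal
def pvHasTriple : List Int → Bool
  | a :: b :: c :: t => (a == b && b == c) || pvHasTriple (b :: c :: t)
  | _ => false
def pvEndsDup : List Int → Bool
  | [a, b] => a == b
  | _ :: b :: t => pvEndsDup (b :: t)
  | _ => false

-- On lists that end in two equal elements or contain three equal consecutive
-- elements, A's deletion-and-shift bookkeeping skips or double-counts elements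
-- (A returns 2 on [1,1], and 3 on [0,0,0,1,2,3], which has 4 distinct values);
-- B returns the number of adjacent-equal groups, the intended count of unique
-- values in a sorted array.
def D_countUniqueValues (sortedArr : List Int) : Prop :=
  pvEndsDup sortedArr = true ∨ pvHasTriple sortedArr = true
instance (sortedArr : List Int) : Decidable (D_countUniqueValues sortedArr) := by
  unfold D_countUniqueValues; infer_instance

def Spec_countUniqueValues (sortedArr : List Int) (out : Int) : Prop :=
  ¬ D_countUniqueValues sortedArr → out = countUniqueValues_alt sortedArr
instance (sortedArr : List Int) (out : Int) : Decidable (Spec_countUniqueValues sortedArr out) := by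
  unfold Spec_countUniqueValues; infer_instance

def pvDiffWitness_countUniqueValues : List Int := [1, 1]
def pvDiffWitnessOut_countUniqueValues : Int × Int := (2, 1)

-- ===== CLAIM (what is proved, stated in full; the proofs are below) =====
def Claim_unchanged_countUniqueValues : Prop := ∀ (sortedArr : List Int), Dom_countUniqueValues sortedArr → Spec_countUniqueValues sortedArr (countUniqueValues sortedArr)
def Claim_changed_countUniqueValues : Prop := Dom_countUniqueValues (pvDiffWitness_countUniqueValues) ∧ D_countUniqueValues (pvDiffWitness_countUniqueValues) ∧ countUniqueValues (pvDiffWitness_countUniqueValues) = pvDiffWitnessOut_countUniqueValues.1 ∧ countUniqueValues_alt (pvDiffWitness_countUniqueValues) = pvDiffWitnessOut_countUniqueValues.2 ∧ pvDiffWitnessOut_countUniqueValues.1 ≠ pvDiffWitnessOut_countUniqueValues.2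

-- ===== LEMMAS AND PROOFS =====

-- number of adjacent-distinct boundaries of q :: ys (B's sum)
def pvBnd : Int → List Int → Nat
  | _, [] => 0
  | q, y :: ys => (if q = y then 0 else 1) + pvBnd y ys

lemma pvBnd_eq_filter (x : Int) (t : List Int) :
    (((x :: t).zip t).filter (fun p : Int × Int => p.1 ≠ p.2)).length = pvBnd x t := by
  induction t generalizing x with
  | nil => rfl
  | cons y ys ih =>
    simp only [List.zip_cons_cons, List.filter, pvBnd, ← ih y]
    by_cases h : x = y <;> simp [h] <;> omega

lemma pvHasTriple_cons (a : Int) (l : List Int) (h : pvHasTriple (a :: l) = false) :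
    pvHasTriple l = false := by
  match l with
  | [] => rfl
  | [_] => rfl
  | b :: c :: t =>
    rw [pvHasTriple, Bool.or_eq_false_iff] at h
    exact h.2

lemma pvEndsDup_cons (a b : Int) (l : List Int) (h : pvEndsDup (a :: b :: l) = false) :
    pvEndsDup (b :: l) = false := by
  match l with
  | [] => rfl
  | c :: t => exact h

-- Main invariant of A's loop on lists with no triple run and a distinct last pair:
-- from the normalized state (Q ++ ys, |Q|-1, |Q|) the loop returns |Q| + pvBnd q ys,
-- where q is the last kept element.
lemma pvLoopA_inv (fuel : Nat) : ∀ (ys Q : List Int) (q : Int),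
    Q ≠ [] → Q.getLast? = some q → 2 * ys.length + 1 ≤ fuel →
    pvHasTriple (q :: ys) = false → pvEndsDup (q :: ys) = false →
    pvLoopA fuel (Q ++ ys) (Q.length - 1) Q.length = (Q.length : Int) + (pvBnd q ys : Int) := by
  induction fuel using Nat.strong_induction_on with
  | _ fuel ih =>
    intro ys Q q hQ hlast hfuel htri hend
    have hQpos : 0 < Q.length := List.length_pos_iff.mpr hQ
    have hidx : Q.length - 1 + 1 = Q.length := Nat.sub_add_cancel hQpos
    have hgetQ : (Q ++ ys).getD (Q.length - 1) 0 = q := by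
      have h1 : (Q ++ ys)[Q.length - 1]? = Q[Q.length - 1]? := by
        rw [List.getElem?_append_left (by omega)]
      rw [List.getD_eq_getElem?_getD, h1, List.getLast?_eq_getElem?] at *
      simp_all
    match fuel, ys with
    | 0, y :: ys' => simp only [List.length_cons] at hfuel; omega
    | fuel, [] =>
      have hnl : ¬ Q.length < (Q ++ ([] : List Int)).length := by simp
      match fuel with
      | 0 => simp [pvLoopA, pvBnd]
      | fuel + 1 =>
        rw [pvLoopA, if_neg hnl]
        simp [pvBnd]
    | fuel + 1, y :: ys' =>
      have hgety : (Q ++ y :: ys').getD Q.length 0 = y := by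
        have h1 : (Q ++ y :: ys')[Q.length]? = some y := by
          rw [List.getElem?_append_right (le_refl _)]
          simp
        simp [List.getD_eq_getElem?_getD, h1]
      rw [pvLoopA, if_pos (by simp), hgetQ, hgety]
      by_cases hqy : q = y
      · -- run of length ≥ 2: j moves to |Q|+1; a next element exists (else pvEndsDup)
        rw [if_pos hqy]
        match ys' with
        | [] =>
          exfalso
          simp [pvEndsDup, hqy] at hend
        | z :: ys'' =>
          have hyz : ¬ (y = z) := by
            intro h
            simp [pvHasTriple, hqy, h] at htri
          match fuel with
          | 0 => simp only [List.length_cons] at hfuel; omega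
          | fuel + 1 =>
            have hgetz : (Q ++ y :: z :: ys'').getD (Q.length + 1) 0 = z := by
              have h1 : (Q ++ y :: z :: ys'')[Q.length + 1]? = some z := by
                rw [List.getElem?_append_right (by omega)]
                simp
              simp [List.getD_eq_getElem?_getD, h1]
            rw [pvLoopA, if_pos (by simp), hgetQ, hgetz, if_neg (by rw [hqy]; exact hyz)]
            -- del arr[i+1 : j] removes the duplicate y; the new state is
            -- normalized with Q' = Q ++ [z]
            have htake : (Q ++ y :: z :: ys'').take (Q.length - 1 + 1) = Q := by
              rw [hidx, List.take_left]
            have hdrop : (Q ++ y :: z :: ys'').drop (Q.length + 1) = z :: ys'' := by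
              simp [List.drop_append]
            rw [htake, hdrop, hidx]
            have hkey := ih fuel (by omega) ys'' (Q ++ [z]) z (by simp)
              (by simp) (by simp only [List.length_cons] at hfuel ⊢; omega)
              (by
                have h1 := pvHasTriple_cons q (y :: z :: ys'') htri
                exact pvHasTriple_cons y (z :: ys'') h1)
              (by
                match ys'' with
                | [] => rfl
                | w :: t =>
                  have h1 := pvEndsDup_cons q y (z :: w :: t) hend
                  exact pvEndsDup_cons y z (w :: t) h1)
            rw [List.append_assoc, List.singleton_append, List.length_append] at hkey
            simp only [List.length_cons, List.length_nil, Nat.add_sub_cancel] at hkey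
            rw [show Q.length + (0 + 1) = Q.length + 1 from by omega] at hkey
            rw [hkey]
            have hbnd : pvBnd q (y :: z :: ys'') = 1 + pvBnd z ys'' := by
              simp [pvBnd, hqy, hyz]
            rw [hbnd]
            push_cast
            ring
      · -- boundary: the del is empty, i catches up, then the equal test advances j
        rw [if_neg hqy]
        have htake : (Q ++ y :: ys').take (Q.length - 1 + 1) = Q := by
          rw [hidx, List.take_left]
        rw [htake, List.drop_left, hidx]
        match fuel with
        | 0 => simp only [List.length_cons] at hfuel; omega
        | fuel + 1 =>
          rw [pvLoopA, if_pos (by simp), if_pos rfl]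
          have hkey := ih fuel (by omega) ys' (Q ++ [y]) y (by simp)
            (by simp) (by simp only [List.length_cons] at hfuel ⊢; omega)
            (pvHasTriple_cons q (y :: ys') htri)
            (by
              match ys' with
              | [] => rfl
              | w :: t => exact pvEndsDup_cons q y (w :: t) hend)
          rw [List.append_assoc, List.singleton_append, List.length_append] at hkey
          simp only [List.length_cons, List.length_nil, Nat.add_sub_cancel] at hkey
          rw [show Q.length + (0 + 1) = Q.length + 1 from by omega] at hkey
          rw [hkey]
          have hbnd : pvBnd q (y :: ys') = 1 + pvBnd y ys' := by
            simp [pvBnd, hqy]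
          rw [hbnd]
          push_cast
          ring

-- ===== VERDICT (by name: the statement is the Claim_ definition above) =====
theorem countUniqueValues_spec : Claim_unchanged_countUniqueValues := by
  intro xs _ hD
  show countUniqueValues xs = countUniqueValues_alt xs
  rw [D_countUniqueValues, not_or] at hD
  obtain ⟨hend, htri⟩ := hD
  rw [Bool.not_eq_true] at hend htri
  match xs with
  | [] => rfl
  | [x] => norm_num [countUniqueValues, countUniqueValues_alt]
  | x :: y :: t =>
    rw [countUniqueValues, if_neg (by simp), if_neg (by simp)]
    have hkey := pvLoopA_inv (2 * (x :: y :: t).length + 2) (y :: t) [x] x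
      (by simp) (by simp) (by simp only [List.length_cons]; omega) htri hend
    rw [List.singleton_append] at hkey
    simp only [List.length_cons, List.length_nil] at hkey ⊢
    rw [show (0:Nat) + 1 - 1 = 0 from rfl, show (0:Nat) + 1 = 1 from rfl] at hkey
    rw [hkey]
    show ((0:Nat) + 1 : Int) + (pvBnd x (y :: t) : Int) = countUniqueValues_alt (x :: y :: t)
    rw [countUniqueValues_alt, if_neg (by simp)]
    simp only [List.drop_one, List.tail_cons]
    rw [pvBnd_eq_filter]
    push_cast
    ring

theorem countUniqueValues_changed : Claim_changed_countUniqueValues := by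
  unfold Claim_changed_countUniqueValues; decide
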